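-- pv_equiv track=rewrite | github.com/csp-12332/sunny | predective.py | slic
-- ===== SOURCE A (Python) =====
-- def slic(st):
--   temp=[]
--   n=len(st)
--   i=0
--   while n>i:
--     if(i<n-1):
--       if(st[i+1])=='\'':
--         temp.append(st[i]+st[i+1])
--         i+=2
--       else:
--         temp.append(st[i])
--         i+=1
--     else:
--       temp.append(st[i])
--       i+=1
--
--   return temp
-- ===== SOURCE B (Python) =====
-- import re
--
-- def slic(st):
--   # One declarative pass: each token is any single character (DOTALL, so
--   # newlines too) with an immediately following apostrophe greedily attached.
--   return re.findall(r"(?s).'?", st)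
-- ===== Notes on version B (the rewrite author's own statement) =====
-- stated objective: idiomatic
-- what changed: Replaced the manual index-lookahead while-loop with a single declarative regex findall pass whose pattern matches any one character (DOTALL) plus an optional immediately-following apostrophe.
import Mathlib
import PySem

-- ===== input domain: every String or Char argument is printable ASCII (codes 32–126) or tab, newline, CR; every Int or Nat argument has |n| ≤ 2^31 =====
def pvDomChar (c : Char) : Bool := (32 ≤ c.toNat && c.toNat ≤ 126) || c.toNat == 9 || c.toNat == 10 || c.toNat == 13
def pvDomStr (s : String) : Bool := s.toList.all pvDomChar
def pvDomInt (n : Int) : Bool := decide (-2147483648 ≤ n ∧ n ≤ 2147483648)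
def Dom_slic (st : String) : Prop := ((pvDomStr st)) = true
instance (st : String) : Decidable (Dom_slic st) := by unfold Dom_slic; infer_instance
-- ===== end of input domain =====

-- B replaces A's index-lookahead while-loop with a regex tokenizer (one char, optional trailing apostrophe); same output.

-- ===== PORT A =====
-- while-loop of A: state (i, temp), indexing st[i] / st[i+1]; i is always in range where read
def slicLoop (s : List Char) (n i : Nat) (temp : List String) : List String :=
  if _h : i < n then
    if i < n - 1 then
      if s.getD (i+1) ' ' = '\'' then
        slicLoop s n (i+2) (temp ++ [String.ofList [s.getD i ' ', s.getD (i+1) ' ']])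
      else
        slicLoop s n (i+1) (temp ++ [String.ofList [s.getD i ' ']])
    else
      slicLoop s n (i+1) (temp ++ [String.ofList [s.getD i ' ']])
  else temp
termination_by n - i

def slic (st : String) : List String :=
  slicLoop st.toList st.toList.length 0 []

-- ===== PORT B =====
-- hand port of re.findall(r"(?s).'?", st): greedy left-to-right scan — one token per
-- position = any one char plus an optional immediately-following apostrophe (exact for this pattern)
def reTok : List Char → List (List Char)
  | [] => []
  | c :: '\'' :: rest => [c, '\''] :: reTok rest
  | c :: rest => [c] :: reTok rest

def slic_alt (st : String) : List String :=
  (reTok st.toList).map String.ofList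

-- ===== PRECONDITION & SPEC =====
def Spec_slic (st : String) (out : List String) : Prop := out = slic_alt st
instance (st : String) (out : List String) : Decidable (Spec_slic st out) := by unfold Spec_slic; infer_instance

-- ===== CLAIM (what is proved, stated in full; the proofs are below) =====
def Claim_equal_slic : Prop := ∀ (st : String), Dom_slic st → Spec_slic st (slic st)

-- ===== LEMMAS AND PROOFS =====

theorem reTok_single (c : Char) : reTok [c] = [[c]] := rfl

theorem reTok_two (c d : Char) (rest : List Char) (hd : ¬ d = '\'') :
    reTok (c :: d :: rest) = [c] :: reTok (d :: rest) := by
  rw [reTok.eq_def]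
  split
  · simp_all
  · rename_i heq
    injection heq with _ h'
    injection h' with h'' _
    exact absurd h'' hd
  · rename_i x1 c' rest' hno heq
    injection heq with h1 h2
    subst h1; subst h2
    rfl

theorem slicLoop_eq (s : List Char) (i : Nat) (temp : List String) :
    slicLoop s s.length i temp = temp ++ (reTok (s.drop i)).map String.ofList := by
  by_cases h : i < s.length
  · have hdrop : s.drop i = s.getD i ' ' :: s.drop (i+1) := by
      rw [List.getD_eq_getElem _ _ h]
      exact (List.getElem_cons_drop h).symm
    by_cases h2 : i + 1 < s.length
    · have hdrop2 : s.drop (i+1) = s.getD (i+1) ' ' :: s.drop (i+2) := by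
        rw [List.getD_eq_getElem _ _ h2]
        exact (List.getElem_cons_drop h2).symm
      by_cases hq : s.getD (i+1) ' ' = '\''
      · rw [slicLoop, dif_pos h, if_pos (by omega), if_pos hq,
          slicLoop_eq s (i+2)]
        rw [hdrop, hdrop2, hq, reTok]
        simp
      · rw [slicLoop, dif_pos h, if_pos (by omega), if_neg hq,
          slicLoop_eq s (i+1)]
        rw [hdrop, hdrop2, reTok_two _ _ _ hq]
        simp
    · have hdrop2 : s.drop (i+1) = [] := List.drop_eq_nil_of_le (by omega)
      rw [slicLoop, dif_pos h, if_neg (by omega), slicLoop_eq s (i+1)]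
      rw [hdrop, hdrop2, reTok_single]
      simp [reTok]
  · rw [slicLoop, dif_neg h, List.drop_eq_nil_of_le (by omega), reTok]
    simp
termination_by s.length - i

-- ===== VERDICT (by name: the statement is the Claim_ definition above) =====
theorem slic_spec : Claim_equal_slic := by
  intro st _
  unfold Spec_slic slic slic_alt
  rw [slicLoop_eq]
  simp
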